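-- pv_equiv track=rewrite | github.com/ThoPhD/DE_Learning | python_algo/subsequence_of_string.py | num_of_subsequence_string
-- ===== SOURCE A (Python) =====
-- from collections import defaultdict
--
-- def make_charactor_count(string_: str) -> dict[str, int]:
--     charactor_count = defaultdict(int)
--     for char in string_:
--         charactor_count[char] += 1
--
--     return charactor_count
--
-- def num_of_subsequence_string(string: str, words: list[str]) -> int:
--     charactor_count = make_charactor_count(string)
--     res = 0
--
--     for word in words:
--         substring_count = make_charactor_count(word)
--         for subsequence, sub_count in substring_count.items():
--             char_count = charactor_count.get(subsequence, None)
--             if not char_count or sub_count > char_count: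
--                 break
--         else:
--             res += 1
--     return res
-- ===== SOURCE B (Python) =====
-- def _rle(cs):
--     # run-length encode a sorted character list into (char, multiplicity) runs
--     runs = []
--     k = 0
--     while k < len(cs):
--         c = cs[k]
--         n = 1
--         k += 1
--         while k < len(cs) and cs[k] == c:
--             n += 1
--             k += 1
--         runs.append((c, n))
--     return runs
--
-- def _fits(rw, rs):
--     # merge-scan two run lists (keys ascending): every run of rw must find a
--     # run of rs with the same char and at least its multiplicity
--     i = 0
--     j = 0
--     while i < len(rw):
--         c, n = rw[i]
--         while j < len(rs) and rs[j][0] != c: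
--             j += 1
--         if j == len(rs):
--             return False
--         if n > rs[j][1]:
--             return False
--         i += 1
--         j += 1
--     return True
--
-- def num_of_subsequence_string(string, words):
--     runs_s = _rle(sorted(string))
--     res = 0
--     for word in words:
--         if _fits(_rle(sorted(word)), runs_s):
--             res += 1
--     return res
-- ===== Notes on version B (the rewrite author's own statement) =====
-- stated objective: alternative
-- what changed: Replaces A's per-word character-count dictionaries checked against a dictionary of the string by sorting the string's characters once and, per word, sorting the word and running a single two-pointer merge scan that greedily consumes slots of the sorted string.
import Mathlib
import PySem

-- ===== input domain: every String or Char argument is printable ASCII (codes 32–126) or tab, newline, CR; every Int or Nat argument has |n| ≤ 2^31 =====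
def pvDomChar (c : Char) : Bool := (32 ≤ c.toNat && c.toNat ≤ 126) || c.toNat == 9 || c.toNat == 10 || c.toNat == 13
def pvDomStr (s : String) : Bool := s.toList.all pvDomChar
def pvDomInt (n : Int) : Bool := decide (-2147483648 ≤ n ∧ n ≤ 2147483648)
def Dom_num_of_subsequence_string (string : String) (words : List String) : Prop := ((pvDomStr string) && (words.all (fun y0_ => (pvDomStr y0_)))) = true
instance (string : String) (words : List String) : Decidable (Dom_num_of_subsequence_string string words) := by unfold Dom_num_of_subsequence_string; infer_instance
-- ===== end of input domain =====

-- B replaces A's per-word count dictionaries by sorting the string once, run-length encoding it,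
-- and merge-scanning each word's sorted runs against the string's runs (objective: alternative algorithm).

-- ===== PORT A =====
-- make_charactor_count: defaultdict(int) counting loop (charactor_count[char] += 1)
def pvMakeCount (cs : List Char) : PySem.Dict Char Int :=
  cs.foldl (fun d c => d.modify c 0 (· + 1)) PySem.Dict.empty

-- the inner 'for … items(): … break / else' loop of A: true = the else-branch is reached
def pvCheckA (d : PySem.Dict Char Int) : List (Char × Int) → Bool
  | [] => true
  | (c, n) :: rest =>
    match d.get? c with          -- char_count = charactor_count.get(subsequence, None)
    | none => false              -- 'not char_count' (None) → break
    | some v => if v == 0 || v < n then false else pvCheckA d rest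

def num_of_subsequence_string (string : String) (words : List String) : Int :=
  let charactor_count := pvMakeCount string.toList
  words.foldl (fun res word =>
    if pvCheckA charactor_count (pvMakeCount word.toList).items then res + 1 else res) 0

-- ===== PORT B =====
-- the inner 'while k < len(cs) and cs[k] == c' run counter of _rle: (n + run length, remaining suffix)
def pvRleRun (c : Char) (n : Int) : List Char → Int × List Char
  | [] => (n, [])
  | b :: rest => if b = c then pvRleRun c (n + 1) rest else (n, b :: rest)

-- the suffix returned by the run counter never grows (termination of pvRle)
theorem pvRleRun_snd_length (c : Char) : ∀ (n : Int) (l : List Char), (pvRleRun c n l).2.length ≤ l.length := by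
  intro n l
  induction l generalizing n with
  | nil => simp [pvRleRun]
  | cons b rest ih =>
    by_cases h : b = c
    · simp only [pvRleRun, if_pos h]
      exact le_trans (ih (n + 1)) (by simp)
    · simp [pvRleRun, if_neg h]

-- _rle: the outer 'while k < len(cs)' loop producing the (char, multiplicity) runs
def pvRle : List Char → List (Char × Int)
  | [] => []
  | c :: rest => (c, (pvRleRun c 1 rest).1) :: pvRle (pvRleRun c 1 rest).2
  termination_by l => l.length
  decreasing_by
    have := pvRleRun_snd_length c 1 rest
    simp only [List.length_cons]
    omega

-- _fits: the merge scan of two run lists; the pointers i, j are the remaining suffixes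
def pvFit : List (Char × Int) → List (Char × Int) → Bool
  | [], _ => true
  | _ :: _, [] => false
  | (c, n) :: tw, (b, m) :: ts =>
    if b = c then (decide (n ≤ m) && pvFit tw ts)
    else pvFit ((c, n) :: tw) ts

def num_of_subsequence_string_alt (string : String) (words : List String) : Int :=
  let runs_s := pvRle (PySem.List.sorted string.toList (fun c => c) false)
  words.foldl (fun res word =>
    if pvFit (pvRle (PySem.List.sorted word.toList (fun c => c) false)) runs_s then res + 1
    else res) 0

-- ===== PRECONDITION & SPEC =====
def Spec_num_of_subsequence_string (string : String) (words : List String) (out : Int) : Prop := out = num_of_subsequence_string_alt string words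
instance (string : String) (words : List String) (out : Int) : Decidable (Spec_num_of_subsequence_string string words out) := by unfold Spec_num_of_subsequence_string; infer_instance

-- ===== CLAIM (what is proved, stated in full; the proofs are below) =====
def Claim_equal_num_of_subsequence_string : Prop := ∀ (string : String) (words : List String), Dom_num_of_subsequence_string string words → Spec_num_of_subsequence_string string words (num_of_subsequence_string string words)

-- ===== LEMMAS AND PROOFS =====

-- A's counting loop is Counter
theorem pvMakeCount_eq (cs : List Char) : pvMakeCount cs = PySem.Dict.counter cs := by
  rfl

-- lookup in the counter of s
theorem counter_get? (s : List Char) (c : Char) :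
    (PySem.Dict.counter s).get? c = if c ∈ s then some ((s.count c : Int)) else none := by
  by_cases h : c ∈ s
  · simp only [h, if_true]
    have hc : ((PySem.Dict.counter s).get? c).isSome := by
      rw [← PySem.Dict.contains_eq_isSome_get?]
      simp [PySem.Dict.contains_iff_mem_keys, PySem.Dict.keys_counter, PySem.Set.mem_ofList, h]
    obtain ⟨v, hv⟩ := Option.isSome_iff_exists.mp hc
    have h1 : (PySem.Dict.counter s).getD c 0 = v := by
      rw [PySem.Dict.getD_eq_get?_getD, hv]; rfl
    rw [PySem.Dict.getD_counter] at h1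
    rw [hv, h1]
  · simp only [h, if_false]
    rw [PySem.Dict.get?_eq_none_iff_not_mem_keys]
    simp [PySem.Dict.keys_counter, PySem.Set.mem_ofList, h]

-- the break/else loop succeeds iff every listed pair fits
theorem pvCheckA_iff (d : PySem.Dict Char Int) (L : List (Char × Int)) :
    pvCheckA d L = true ↔ ∀ p ∈ L, ∃ v, d.get? p.1 = some v ∧ v ≠ 0 ∧ p.2 ≤ v := by
  induction L with
  | nil => simp [pvCheckA]
  | cons p rest ih =>
    obtain ⟨c, n⟩ := p
    simp only [pvCheckA]
    cases hg : d.get? c with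
    | none => simp [hg]
    | some v =>
      dsimp only
      by_cases h0 : v = 0
      · simp [h0, hg]
      · by_cases hlt : v < n
        · simp only [hlt, decide_true, if_true, Bool.or_true]
          constructor
          · intro h; simp_all
          · intro h
            obtain ⟨w, hw, -, hnw⟩ := h (c, n) (by simp)
            rw [hg] at hw; cases hw; omega
        · have hcond : ((v == 0 : Bool) || decide (v < n)) = false := by
            simp [h0, hlt]
          rw [hcond]
          simp only [Bool.false_eq_true, if_false, ih]
          constructor
          · intro h p hp
            rcases List.mem_cons.mp hp with h1 | h2
            · subst h1; exact ⟨v, hg, h0, by omega⟩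
            · exact h p h2
          · intro h p hp; exact h p (List.mem_cons_of_mem _ hp)

-- A's per-word test ⟺ multiset containment of character counts
theorem checkA_counts (s w : List Char) :
    pvCheckA (PySem.Dict.counter s) (PySem.Dict.counter w).items = true ↔
      ∀ c ∈ w, w.count c ≤ s.count c := by
  rw [pvCheckA_iff]
  rw [PySem.Dict.items_counter]
  constructor
  · intro h c hc
    obtain ⟨v, hv, -, hle⟩ := h (c, (w.count c : Int))
      (List.mem_map.mpr ⟨c, (PySem.Set.mem_ofList _ _).mpr hc, rfl⟩)
    rw [counter_get?] at hv
    by_cases hcs : c ∈ s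
    · simp only [hcs, if_true, Option.some.injEq] at hv
      subst hv; dsimp only at hle; exact_mod_cast hle
    · simp [hcs] at hv
  · intro h p hp
    obtain ⟨c, hc, rfl⟩ := List.mem_map.mp hp
    have hcw : c ∈ w := (PySem.Set.mem_ofList _ _).mp hc
    have hle := h c hcw
    have hcs : c ∈ s := by
      have := List.count_pos_iff.mpr hcw
      exact List.count_pos_iff.mp (by omega)
    refine ⟨(s.count c : Int), ?_, ?_, by dsimp only; exact_mod_cast hle⟩
    · rw [counter_get?]; simp [hcs]
    · have := List.count_pos_iff.mpr hcs
      omega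

-- the two defining equations of pvRle (it is defined by well-founded recursion)
theorem pvRle_nil : pvRle [] = [] := by rw [pvRle]
theorem pvRle_cons (c : Char) (rest : List Char) :
    pvRle (c :: rest) = (c, (pvRleRun c 1 rest).1) :: pvRle (pvRleRun c 1 rest).2 := by
  rw [pvRle]

-- the run counter on a list of elements all ≥ c returns n + count and drops exactly the c-prefix
theorem pvRleRun_spec (l : List Char) (c : Char) (n : Int)
    (hs : l.Pairwise (· ≤ ·)) (hge : ∀ x ∈ l, c ≤ x) :
    pvRleRun c n l = (n + (l.count c : Int), l.dropWhile (· == c)) := by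
  induction l generalizing n with
  | nil => simp [pvRleRun]
  | cons b t ih =>
    rw [List.pairwise_cons] at hs
    by_cases h : b = c
    · subst h
      rw [show pvRleRun b n (b :: t) = pvRleRun b (n + 1) t from by simp [pvRleRun]]
      rw [ih (n + 1) hs.2 (fun x hx => hge x (List.mem_cons_of_mem _ hx))]
      rw [List.dropWhile_cons_of_pos (by simp)]
      simp only [List.count_cons_self, Prod.mk.injEq, and_true]
      push_cast
      ring
    · have hcb : c < b := lt_of_le_of_ne (hge b List.mem_cons_self) (Ne.symm h)
      have hnot : c ∉ b :: t := by
        intro hmem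
        rcases List.mem_cons.mp hmem with h1 | h2
        · exact h h1.symm
        · exact absurd (hs.1 c h2) (not_le.mpr hcb)
      rw [show pvRleRun c n (b :: t) = (n, b :: t) from by simp [pvRleRun, h]]
      rw [List.count_eq_zero_of_not_mem hnot]
      rw [List.dropWhile_cons_of_neg (by simp [h])]
      simp

-- elements surviving the dropped c-prefix of a sorted c-bounded list are > c
theorem gt_of_mem_dropWhile (c : Char) : ∀ (l : List Char), l.Pairwise (· ≤ ·) →
    (∀ x ∈ l, c ≤ x) → ∀ x ∈ l.dropWhile (· == c), c < x := by
  intro l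
  induction l with
  | nil => simp
  | cons b t ih =>
    intro hs hge x hx
    rw [List.pairwise_cons] at hs
    by_cases h : b = c
    · rw [List.dropWhile_cons_of_pos (by simp [h])] at hx
      exact ih hs.2 (fun y hy => hge y (List.mem_cons_of_mem _ hy)) x hx
    · rw [List.dropWhile_cons_of_neg (by simp [h])] at hx
      have hcb : c < b := lt_of_le_of_ne (hge b List.mem_cons_self) (Ne.symm h)
      rcases List.mem_cons.mp hx with h1 | h2
      · exact h1 ▸ hcb
      · exact lt_of_lt_of_le hcb (hs.1 x h2)

-- counts of a character ≠ c are unchanged by dropping the c-prefix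
theorem count_dropWhile (c c' : Char) (hne : c' ≠ c) (l : List Char) :
    (l.dropWhile (· == c)).count c' = l.count c' := by
  conv_rhs => rw [← List.takeWhile_append_dropWhile (p := (· == c)) (l := l)]
  rw [List.count_append]
  have : (l.takeWhile (· == c)).count c' = 0 := by
    apply List.count_eq_zero_of_not_mem
    intro hmem
    have := List.mem_takeWhile_imp hmem
    simp at this
    exact hne this
  omega

-- the bundled characterisation of _rle on a sorted list: keys strictly increase,
-- every run is (c, count of c), and every character has its run
theorem pvRle_spec (N : Nat) : ∀ (l : List Char), l.length ≤ N → l.Pairwise (· ≤ ·) →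
    (pvRle l).Pairwise (fun p q => p.1 < q.1) ∧
    (∀ p ∈ pvRle l, p.1 ∈ l ∧ p.2 = (l.count p.1 : Int)) ∧
    (∀ c ∈ l, (c, (l.count c : Int)) ∈ pvRle l) := by
  induction N with
  | zero =>
    intro l hl _
    have : l = [] := List.eq_nil_of_length_eq_zero (by omega)
    subst this
    simp [pvRle_nil]
  | succ N ih =>
    intro l hl hs
    match l with
    | [] => simp [pvRle_nil]
    | c :: rest =>
      rw [List.pairwise_cons] at hs
      have hge : ∀ x ∈ rest, c ≤ x := hs.1
      have hrun := pvRleRun_spec rest c 1 hs.2 hge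
      set rest' := rest.dropWhile (· == c) with hrest'
      have hsub : rest'.Sublist rest := List.dropWhile_sublist _
      have hs' : rest'.Pairwise (· ≤ ·) := hs.2.sublist hsub
      have hlen : rest'.length ≤ N := by
        have := hsub.length_le
        simp only [List.length_cons] at hl
        omega
      have hgt : ∀ x ∈ rest', c < x := gt_of_mem_dropWhile c rest hs.2 hge
      obtain ⟨ih1, ih2, ih3⟩ := ih rest' hlen hs'
      have hunf : pvRle (c :: rest) = (c, 1 + (rest.count c : Int)) :: pvRle rest' := by
        rw [pvRle_cons, hrun]
      have hcount : ((c :: rest).count c : Int) = 1 + (rest.count c : Int) := by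
        push_cast [List.count_cons_self]
        ring
      have hcount' : ∀ c' : Char, c' ≠ c → (c :: rest).count c' = rest'.count c' := by
        intro c' hne
        rw [hrest', count_dropWhile c c' hne rest, List.count_cons_of_ne (Ne.symm hne)]
      refine ⟨?_, ?_, ?_⟩
      · rw [hunf, List.pairwise_cons]
        refine ⟨?_, ih1⟩
        intro q hq
        exact hgt q.1 (ih2 q hq).1
      · rw [hunf]
        intro p hp
        rcases List.mem_cons.mp hp with h1 | h2
        · subst h1
          exact ⟨List.mem_cons_self, by rw [hcount]⟩
        · obtain ⟨hm, hv⟩ := ih2 p h2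
          have hne : p.1 ≠ c := ne_of_gt (hgt p.1 hm)
          refine ⟨List.mem_cons_of_mem _ (hsub.mem hm), ?_⟩
          rw [hv, hcount' p.1 hne]
      · intro c' hc'
        rw [hunf]
        by_cases hne : c' = c
        · subst hne
          rw [hcount]
          exact List.mem_cons_self
        · have hc'rest : c' ∈ rest := by
            rcases List.mem_cons.mp hc' with h1 | h2
            · exact absurd h1 hne
            · exact h2
          have hc'rest' : c' ∈ rest' := by
            have : rest'.count c' = (c :: rest).count c' := (hcount' c' hne).symm
            rw [List.count_cons_of_ne (Ne.symm hne)] at this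
            have hpos := List.count_pos_iff.mpr hc'rest
            exact List.count_pos_iff.mp (by omega)
          have := ih3 c' hc'rest'
          rw [hcount' c' hne]
          exact List.mem_cons_of_mem _ this

-- the merge scan over two run lists with strictly increasing keys decides run containment
theorem pvFit_iff : ∀ (rs rw : List (Char × Int)),
    rw.Pairwise (fun p q => p.1 < q.1) → rs.Pairwise (fun p q => p.1 < q.1) →
    (pvFit rw rs = true ↔ ∀ p ∈ rw, ∃ m, (p.1, m) ∈ rs ∧ p.2 ≤ m) := by
  intro rs
  induction rs with
  | nil =>
    intro rw _ _
    cases rw with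
    | nil => simp [pvFit]
    | cons p tw =>
      obtain ⟨c, n⟩ := p
      simp only [pvFit, Bool.false_eq_true, false_iff, not_forall]
      exact ⟨(c, n), List.mem_cons_self, by simp⟩
  | cons q ts ih =>
    obtain ⟨b, m⟩ := q
    intro rw hw hss
    rw [List.pairwise_cons] at hss
    cases rw with
    | nil => simp [pvFit]
    | cons p tw =>
      obtain ⟨c, n⟩ := p
      rw [List.pairwise_cons] at hw
      by_cases hbc : b = c
      · subst hbc
        simp only [pvFit]
        rw [if_pos trivial]
        simp only [Bool.and_eq_true, decide_eq_true_eq]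
        rw [ih tw hw.2 hss.2]
        constructor
        · rintro ⟨hnm, h⟩ p hp
          rcases List.mem_cons.mp hp with h1 | h2
          · subst h1; exact ⟨m, List.mem_cons_self, hnm⟩
          · obtain ⟨m', hm', hle⟩ := h p h2
            exact ⟨m', List.mem_cons_of_mem _ hm', hle⟩
        · intro h
          obtain ⟨m', hm', hle⟩ := h (b, n) List.mem_cons_self
          have hm'm : m' = m := by
            rcases List.mem_cons.mp hm' with h1 | h2
            · exact (Prod.mk.injEq _ _ _ _ ▸ h1).2
            · exact absurd (hss.1 _ h2) (by simp)
          refine ⟨hm'm ▸ hle, ?_⟩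
          intro p hp
          obtain ⟨m'', hm'', hle''⟩ := h p (List.mem_cons_of_mem _ hp)
          rcases List.mem_cons.mp hm'' with h1 | h2
          · exfalso
            have : p.1 = b := congrArg Prod.fst h1
            exact absurd this (ne_of_gt (hw.1 p hp))
          · exact ⟨m'', h2, hle''⟩
      · rcases lt_or_gt_of_ne hbc with hlt | hgt
        · -- b < c: skip the (b, m) run of the string
          rw [show pvFit ((c, n) :: tw) ((b, m) :: ts) = pvFit ((c, n) :: tw) ts from by
            simp [pvFit, hbc]]
          rw [ih ((c, n) :: tw) (List.pairwise_cons.mpr hw) hss.2]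
          apply forall₂_congr
          intro p hp
          have hpb : p.1 ≠ b := by
            rcases List.mem_cons.mp hp with h1 | h2
            · subst h1; exact ne_of_gt hlt
            · exact ne_of_gt (lt_trans hlt (hw.1 p h2))
          constructor
          · rintro ⟨m', hm', hle⟩
            exact ⟨m', List.mem_cons_of_mem _ hm', hle⟩
          · rintro ⟨m', hm', hle⟩
            refine ⟨m', ?_, hle⟩
            rcases List.mem_cons.mp hm' with h1 | h2
            · exact absurd (congrArg Prod.fst h1) hpb
            · exact h2
        · -- c < b: the character c has no run in the string side; both sides are false
          rw [show pvFit ((c, n) :: tw) ((b, m) :: ts) = pvFit ((c, n) :: tw) ts from by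
            simp [pvFit, hbc]]
          rw [ih ((c, n) :: tw) (List.pairwise_cons.mpr hw) hss.2]
          have hnone : ∀ m' : Int, (c, m') ∉ ts := by
            intro m' hmem
            exact absurd (hss.1 _ hmem) (not_lt.mpr (le_of_lt hgt))
          constructor
          · intro h
            exact absurd h (by
              simp only [not_forall]
              refine ⟨(c, n), List.mem_cons_self, ?_⟩
              rintro ⟨m', hm', -⟩
              exact hnone m' hm')
          · intro h
            exfalso
            obtain ⟨m', hm', -⟩ := h (c, n) List.mem_cons_self
            rcases List.mem_cons.mp hm' with h1 | h2
            · exact hbc ((Prod.mk.injEq _ _ _ _ ▸ h1).1).symm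
            · exact hnone m' h2

-- B's per-word test ⟺ multiset containment of character counts
theorem fit_counts (s w : List Char) :
    pvFit (pvRle (PySem.List.sorted w (fun c => c) false))
          (pvRle (PySem.List.sorted s (fun c => c) false)) = true ↔
      ∀ c ∈ w, w.count c ≤ s.count c := by
  have pw := PySem.List.sorted_perm w (fun c : Char => c) false
  have ps := PySem.List.sorted_perm s (fun c : Char => c) false
  obtain ⟨w1, w2, w3⟩ := pvRle_spec (PySem.List.sorted w (fun c => c) false).length
    _ le_rfl (PySem.List.sorted_pairwise w (fun c => c))
  obtain ⟨s1, s2, s3⟩ := pvRle_spec (PySem.List.sorted s (fun c => c) false).length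
    _ le_rfl (PySem.List.sorted_pairwise s (fun c => c))
  rw [pvFit_iff _ _ w1 s1]
  constructor
  · intro h c hc
    obtain ⟨m, hm, hle⟩ := h (c, ((PySem.List.sorted w (fun c => c) false).count c : Int))
      (w3 c (pw.mem_iff.mpr hc))
    have := (s2 _ hm).2
    dsimp only at this hle ⊢
    rw [this] at hle
    rw [pw.count_eq, ps.count_eq] at hle
    exact_mod_cast hle
  · intro h p hp
    obtain ⟨hm, hv⟩ := w2 p hp
    have hpw : p.1 ∈ w := pw.mem_iff.mp hm
    have hle := h p.1 hpw
    have hps : p.1 ∈ s := by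
      have := List.count_pos_iff.mpr hpw
      exact List.count_pos_iff.mp (by omega)
    refine ⟨((PySem.List.sorted s (fun c => c) false).count p.1 : Int),
      s3 p.1 (ps.mem_iff.mpr hps), ?_⟩
    rw [hv, pw.count_eq, ps.count_eq]
    exact_mod_cast hle

-- the per-word tests of the two ports agree
theorem key_word (s w : List Char) :
    pvCheckA (pvMakeCount s) (pvMakeCount w).items =
      pvFit (pvRle (PySem.List.sorted w (fun c => c) false))
            (pvRle (PySem.List.sorted s (fun c => c) false)) := by
  rw [pvMakeCount_eq, pvMakeCount_eq, Bool.eq_iff_iff, checkA_counts, fit_counts]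

-- ===== VERDICT (by name: the statement is the Claim_ definition above) =====
theorem num_of_subsequence_string_spec : Claim_equal_num_of_subsequence_string := by
  intro s words _
  unfold Spec_num_of_subsequence_string num_of_subsequence_string num_of_subsequence_string_alt
  simp only []
  congr 1
  funext res word
  rw [key_word]
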